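-- pv_equiv track=rewrite | github.com/byhow/prax | python/shopping.py | max_reward
-- ===== SOURCE A (Python) =====
-- import heapq
--
-- def max_reward(reward: [int]):
--     nums = []
--     for i in reward:
--         heapq.heappush(nums, -i)
--
--     ans = -heapq.heappop(nums)
--     i = 1
--     while nums:
--         curr = -heapq.heappop(nums)
--         if curr - i <= 0:
--             break
--         ans += curr - i
--         i += 1
--
--     return ans
-- ===== SOURCE B (Python) =====
-- def max_reward(reward: [int]):
--     # Sort descending. The net contribution of position k is s[k] - k, which is
--     # strictly decreasing in k, so the cutoff (first k >= 1 with s[k] - k <= 0)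
--     # is found by binary search; the collected terms then sum in closed form:
--     # sum(s[:m]) minus the triangular penalty m*(m-1)//2.
--     s = sorted(reward, reverse=True)
--     lo, hi = 1, len(s)
--     while lo < hi:
--         mid = (lo + hi) // 2
--         if s[mid] - mid <= 0:
--             hi = mid
--         else:
--             lo = mid + 1
--     return sum(s[:lo]) - lo * (lo - 1) // 2
-- ===== Notes on version B (the rewrite author's own statement) =====
-- stated objective: faster
-- what changed: replaces the heap-pop loop with running accumulator and incrementing penalty by one descending sort, a binary search for the cutoff index where s[k]-k becomes nonpositive (valid since s[k]-k is strictly decreasing), and a closed-form answer: prefix sum minus the triangular penalty m*(m-1)//2; constant-factor speedup: one C-level sort and sum plus an O(log n) search replace n Python-level heappush/heappop calls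
-- outside the precondition, e.g. on max_reward([]): A raises IndexError, B returns 0
import Mathlib
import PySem

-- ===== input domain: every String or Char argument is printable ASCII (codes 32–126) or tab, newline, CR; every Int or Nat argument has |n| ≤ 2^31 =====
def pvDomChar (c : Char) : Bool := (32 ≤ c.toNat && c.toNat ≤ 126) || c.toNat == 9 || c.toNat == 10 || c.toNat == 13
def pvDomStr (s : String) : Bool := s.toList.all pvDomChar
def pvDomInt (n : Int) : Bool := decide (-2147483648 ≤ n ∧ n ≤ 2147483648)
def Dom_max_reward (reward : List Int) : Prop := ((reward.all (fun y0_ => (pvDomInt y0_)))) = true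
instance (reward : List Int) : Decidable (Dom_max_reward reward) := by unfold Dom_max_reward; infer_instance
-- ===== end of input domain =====

-- B replaces A's heap-pop loop (running accumulator, incrementing penalty) by one descending
-- sort, a BINARY SEARCH for the cutoff index where s[k]-k becomes nonpositive, and a
-- closed-form answer: prefix sum minus the triangular penalty m*(m-1)//2 (alternative).
-- Equivalence is proved on nonempty inputs (on [] A's heappop raises IndexError).

-- ===== PORT A =====
-- heapq is a library call; its min-priority-queue contract is modeled by a sorted
-- ascending list: heappush = ordered insertion, heappop = take the head.
def pvHeappush (h : List Int) (x : Int) : List Int := List.orderedInsert (· ≤ ·) x h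

-- the while loop of A: pop the most negative element, negate it back, apply the penalty
def pvLoopA (nums : List Int) (ans i : Int) : Int :=
  match nums with
  | [] => ans
  | n :: rest =>
      let curr := -n
      if curr - i ≤ 0 then ans else pvLoopA rest (ans + (curr - i)) (i + 1)

def max_reward (reward : List Int) : Int :=
  let nums := reward.foldl (fun h x => pvHeappush h (-x)) []
  match nums with
  | [] => 0  -- unreachable under Pre_: Python's heappop raises IndexError here
  | n :: rest => pvLoopA rest (-n) 1

-- ===== PORT B =====
-- midpoint bounds, needed by pvBS's termination proof
lemma pvMid_lt (lo hi : Int) (h : lo < hi) :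
    lo ≤ PySem.Int.floordiv (lo + hi) 2 ∧ PySem.Int.floordiv (lo + hi) 2 < hi := by
  rw [PySem.Int.floordiv_eq_ediv_of_pos (by norm_num)]
  omega

-- the while loop of B: binary search for the first index k in [lo, hi) with s[k] - k <= 0
-- (s[mid] is ported as pyGet? with default 0; the index is always in range when 1 ≤ lo and
-- hi ≤ len s, which the callers maintain, so the default is never used)
def pvBS (s : List Int) (lo hi : Int) : Int :=
  if h : lo < hi then
    let mid := PySem.Int.floordiv (lo + hi) 2
    if (PySem.List.pyGet? s mid).getD 0 - mid ≤ 0 then pvBS s lo mid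
    else pvBS s (mid + 1) hi
  else lo
termination_by (hi - lo).toNat
decreasing_by
  · have := pvMid_lt lo hi h; omega
  · have := pvMid_lt lo hi h; omega

def max_reward_alt (reward : List Int) : Int :=
  let s := PySem.List.sorted reward (fun x => x) true
  let lo := pvBS s 1 (s.length : Int)
  (PySem.List.slice s none (some lo)).sum - PySem.Int.floordiv (lo * (lo - 1)) 2

-- ===== PRECONDITION & SPEC =====
-- Pre_ excludes only the empty list, on which A's first heappop raises IndexError.
def Pre_max_reward (reward : List Int) : Prop := reward ≠ []
instance (reward : List Int) : Decidable (Pre_max_reward reward) := by unfold Pre_max_reward; infer_instance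
def pvWitness_max_reward : List Int := ([3, 1, 2])

def Spec_max_reward (reward : List Int) (out : Int) : Prop := out = max_reward_alt reward
instance (reward : List Int) (out : Int) : Decidable (Spec_max_reward reward out) := by unfold Spec_max_reward; infer_instance

-- ===== CLAIM (what is proved, stated in full; the proofs are below) =====
def Claim_equal_max_reward : Prop := ∀ (reward : List Int), Dom_max_reward reward → Pre_max_reward reward → Spec_max_reward reward (max_reward reward)

-- ===== LEMMAS AND PROOFS =====

-- ---- A-side: the heap really delivers the values in descending order ----

-- the folded heap is a permutation of the negated input (plus the accumulator)
lemma pvFold_perm : ∀ (l h0 : List Int),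
    (l.foldl (fun h x => pvHeappush h (-x)) h0).Perm (l.map (fun x : Int => -x) ++ h0) := by
  intro l
  induction l with
  | nil => intro h0; simp
  | cons x t ih =>
      intro h0
      simp only [List.foldl_cons, List.map_cons, List.cons_append]
      refine (ih (pvHeappush h0 (-x))).trans ?_
      refine (List.Perm.append_left _ (List.perm_orderedInsert _ _ _)).trans ?_
      exact List.perm_middle

-- the folded heap is sorted ascending
lemma pvFold_sorted : ∀ (l h0 : List Int), h0.Pairwise (· ≤ ·) →
    (l.foldl (fun h x => pvHeappush h (-x)) h0).Pairwise (· ≤ ·) := by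
  intro l
  induction l with
  | nil => intro h0 hs; simpa using hs
  | cons x t ih =>
      intro h0 hs
      exact ih _ (List.Pairwise.orderedInsert _ _ hs)

-- A's while loop, rephrased on the (un-negated) descending list
def pvLoopB (s : List Int) (ans i : Int) : Int :=
  match s with
  | [] => ans
  | curr :: rest =>
      if curr - i ≤ 0 then ans else pvLoopB rest (ans + (curr - i)) (i + 1)

-- loop A on a list of negated values is pvLoopB on the values
lemma pvLoopA_eq_loopB : ∀ (l : List Int) (ans i : Int),
    pvLoopA (l.map (fun x : Int => -x)) ans i = pvLoopB l ans i := by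
  intro l
  induction l with
  | nil => intro ans i; rfl
  | cons c t ih =>
      intro ans i
      simp only [List.map_cons, pvLoopA, pvLoopB, neg_neg, ih]

-- the negated heap IS B's descending sort
lemma pvHeap_map_neg : ∀ (reward : List Int),
    (reward.foldl (fun h x => pvHeappush h (-x)) []).map (fun x : Int => -x)
      = PySem.List.sorted reward (fun x => x) true := by
  intro reward
  refine PySem.List.eq_of_perm_of_pairwise_le_of_injective (fun a : Int => -a) neg_injective ?_ ?_ ?_
  · refine List.Perm.trans (List.Perm.map _ (by simpa using pvFold_perm reward [])) ?_
    refine List.Perm.trans ?_ (PySem.List.sorted_perm reward (fun x => x) true).symm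
    have he : (reward.map (fun x : Int => -x)).map (fun x : Int => -x) = reward := by
      simp [List.map_map]
    rw [he]
  · have h := pvFold_sorted reward [] (by simp)
    rw [List.pairwise_map]
    exact h.imp (fun hab => by dsimp only; omega)
  · have h := PySem.List.sorted_pairwise_rev reward (fun x => x)
    exact h.imp (fun hab => by dsimp only; omega)

-- A on a nonempty input is pvLoopB on the tail of the descending sort
lemma pvA_eq_loopB (reward : List Int) (a : Int) (rest : List Int)
    (hs : PySem.List.sorted reward (fun x => x) true = a :: rest) :
    max_reward reward = pvLoopB rest a 1 := by
  unfold max_reward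
  have h := pvHeap_map_neg reward
  rw [hs] at h
  cases hL : reward.foldl (fun h x => pvHeappush h (-x)) [] with
  | nil => rw [hL] at h; simp at h
  | cons n rest' =>
      rw [hL] at h
      simp only [List.map_cons, List.cons.injEq] at h
      obtain ⟨h1, h2⟩ := h
      have hrr : rest.map (fun x : Int => -x) = rest' := by
        rw [← h2]; simp [List.map_map]
      have hl := pvLoopA_eq_loopB rest a 1
      rw [hrr] at hl
      show pvLoopA rest' (-n) 1 = pvLoopB rest a 1
      rw [h1]
      exact hl

-- ---- B-side: the cutoff and the closed forms ----

-- length of the prefix of the tail that the A-loop actually consumes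
def pvCut : List Int → Int → Nat
  | [], _ => 0
  | c :: t, i => if c - i ≤ 0 then 0 else pvCut t (i + 1) + 1

-- triangular number 0 + 1 + … + (k-1)
def pvTri : Nat → Int
  | 0 => 0
  | k + 1 => pvTri k + k

lemma pvCut_le_length : ∀ (t : List Int) (i : Int), pvCut t i ≤ t.length := by
  intro t
  induction t with
  | nil => intro i; simp [pvCut]
  | cons c t ih =>
      intro i
      simp only [pvCut, List.length_cons]
      split
      · omega
      · have := ih (i + 1); omega

lemma pvCut_lt_pos : ∀ (t : List Int) (i : Int) (j : Nat) (h : j < t.length),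
    j < pvCut t i → i + j < t[j] := by
  intro t
  induction t with
  | nil => intro i j h; simp at h
  | cons c t ih =>
      intro i j h hj
      simp only [pvCut] at hj
      split at hj
      · omega
      · cases j with
        | zero => simpa using (by omega : i < c)
        | succ j' =>
            have hj' : j' < t.length := by
              simp only [List.length_cons] at h; omega
            have hih := ih (i + 1) j' hj' (by omega)
            simp only [List.getElem_cons_succ]
            push_cast at hih ⊢
            omega

lemma pvCut_stop : ∀ (t : List Int) (i : Int) (h : pvCut t i < t.length),
    t[pvCut t i] - (i + pvCut t i) ≤ 0 := by
  intro t
  induction t with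
  | nil => intro i h; simp at h
  | cons c t ih =>
      intro i h
      by_cases hc : c - i ≤ 0
      · simp only [pvCut, if_pos hc]
        simpa using hc
      · simp only [pvCut, if_neg hc] at h ⊢
        have := ih (i + 1) (by simpa using h)
        push_cast at this ⊢
        simp only [List.getElem_cons_succ]
        omega

-- pvLoopB in closed form: prefix sum minus the arithmetic-series penalty
lemma pvLoopB_closed : ∀ (rest : List Int) (a i : Int),
    pvLoopB rest a i
      = a + (rest.take (pvCut rest i)).sum - (pvCut rest i) * i - pvTri (pvCut rest i) := by
  intro rest
  induction rest with
  | nil => intro a i; simp [pvLoopB, pvCut, pvTri]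
  | cons c t ih =>
      intro a i
      by_cases hc : c - i ≤ 0
      · simp [pvLoopB, pvCut, hc, pvTri]
      · simp only [pvLoopB, pvCut, if_neg hc, List.take_succ_cons, List.sum_cons, pvTri]
        rw [ih (a + (c - i)) (i + 1)]
        push_cast
        ring

-- the triangular number as Python's m*(m-1)//2
lemma pvTri_two : ∀ (k : Nat), 2 * pvTri k = (k : Int) * ((k : Int) - 1) := by
  intro k
  induction k with
  | zero => simp [pvTri]
  | succ n ih =>
      simp only [pvTri]
      push_cast
      push_cast at ih
      linear_combination ih

lemma pvTri_floordiv (k : Nat) :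
    PySem.Int.floordiv ((k : Int) * ((k : Int) - 1)) 2 = pvTri k := by
  rw [← pvTri_two k, PySem.Int.floordiv_eq_ediv_of_pos (by norm_num)]
  exact Int.mul_ediv_cancel_left _ (by norm_num)

-- a defaulted pyGet? at an in-range nonnegative index is getElem
lemma pvGetD0 (s : List Int) (k : Int) (h0 : 0 ≤ k) (h1 : k.toNat < s.length) :
    (PySem.List.pyGet? s k).getD 0 = s[k.toNat] := by
  obtain ⟨n, rfl⟩ : ∃ n : Nat, k = (n : Int) := ⟨k.toNat, by omega⟩
  simp only [Int.toNat_natCast] at h1 ⊢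
  rw [PySem.List.pyGet?_natCast, List.getElem?_eq_getElem h1]
  rfl

-- binary-search correctness: pvBS finds the unique boundary m of a monotone condition
lemma pvBS_correct (s : List Int) (m : Int) : ∀ (n : Nat) (lo hi : Int),
    (hi - lo).toNat ≤ n → lo ≤ m → m ≤ hi →
    (∀ k : Int, lo ≤ k → k < m → ¬ ((PySem.List.pyGet? s k).getD 0 - k ≤ 0)) →
    (∀ k : Int, m ≤ k → k < hi → (PySem.List.pyGet? s k).getD 0 - k ≤ 0) →
    pvBS s lo hi = m := by
  intro n
  induction n with
  | zero =>
      intro lo hi hn h1 h2 _ _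
      rw [pvBS, dif_neg (by omega)]
      omega
  | succ n ih =>
      intro lo hi hn h1 h2 hlt hge
      rw [pvBS]
      by_cases h : lo < hi
      · rw [dif_pos h]
        have hm := pvMid_lt lo hi h
        by_cases hc : (PySem.List.pyGet? s (PySem.Int.floordiv (lo + hi) 2)).getD 0
            - PySem.Int.floordiv (lo + hi) 2 ≤ 0
        · simp only [if_pos hc]
          have hmm : m ≤ PySem.Int.floordiv (lo + hi) 2 := by
            by_contra hx
            exact hlt _ (by omega) (by omega) hc
          exact ih lo _ (by omega) h1 hmm hlt (fun k hk1 hk2 => hge k hk1 (by omega))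
        · simp only [if_neg hc]
          have hmm : PySem.Int.floordiv (lo + hi) 2 < m := by
            by_contra hx
            exact hc (hge _ (by omega) (by omega))
          exact ih _ hi (by omega) (by omega) h2 (fun k hk1 hk2 => hlt k (by omega) hk2) hge
      · rw [dif_neg h]; omega

-- B on a nonempty input is also pvLoopB on the tail of the descending sort
lemma pvB_eq_loopB (reward : List Int) (a : Int) (rest : List Int)
    (hs : PySem.List.sorted reward (fun x => x) true = a :: rest) :
    max_reward_alt reward = pvLoopB rest a 1 := by
  unfold max_reward_alt
  rw [hs]
  dsimp only
  have hdesc : (a :: rest).Pairwise (fun x y => y ≤ x) := by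
    have := PySem.List.sorted_pairwise_rev reward (fun x => x)
    rwa [hs] at this
  have hcutle := pvCut_le_length rest 1
  -- the binary search returns 1 + pvCut rest 1
  have hbs : pvBS (a :: rest) 1 ((a :: rest).length : Int) = 1 + (pvCut rest 1 : Int) := by
    apply pvBS_correct (a :: rest) _ (((a :: rest).length : Int) - 1).toNat
    · omega
    · omega
    · simp only [List.length_cons]; push_cast; omega
    · intro k hk1 hk2
      have hkl : k.toNat < (a :: rest).length := by
        simp only [List.length_cons]; omega
      rw [pvGetD0 _ k (by omega) hkl]
      obtain ⟨j, hj2⟩ : ∃ j : Nat, k.toNat = j + 1 := ⟨k.toNat - 1, by omega⟩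
      have hjl : j < rest.length := by
        simp only [List.length_cons] at hkl; omega
      have hpos := pvCut_lt_pos rest 1 j hjl (by omega)
      simp only [hj2, List.getElem_cons_succ]
      push_cast at hpos ⊢
      omega
    · intro k hk1 hk2
      have hkl : k.toNat < (a :: rest).length := by
        simp only [List.length_cons] at hk2 ⊢; push_cast at hk2; omega
      rw [pvGetD0 _ k (by omega) hkl]
      obtain ⟨j, hj2⟩ : ∃ j : Nat, k.toNat = j + 1 := ⟨k.toNat - 1, by omega⟩
      have hjl : j < rest.length := by
        simp only [List.length_cons] at hkl; omega
      have hjc : pvCut rest 1 ≤ j := by omega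
      have hcl : pvCut rest 1 < rest.length := by omega
      have hstop := pvCut_stop rest 1 hcl
      have hmono : rest[j] ≤ rest[pvCut rest 1] := by
        rcases Nat.lt_or_ge (pvCut rest 1) j with hlt' | hge'
        · have hp := List.pairwise_iff_getElem.mp (hdesc.sublist (List.sublist_cons_self a rest))
          exact hp (pvCut rest 1) j hcl hjl hlt'
        · have hje : j = pvCut rest 1 := by omega
          exact hje ▸ le_refl _
      simp only [hj2, List.getElem_cons_succ]
      push_cast at hstop ⊢
      omega
  rw [hbs, pvLoopB_closed]
  have hsl : PySem.List.slice (a :: rest) none (some (1 + (pvCut rest 1 : Int)))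
      = a :: rest.take (pvCut rest 1) := by
    rw [show (1 + (pvCut rest 1 : Int)) = (((pvCut rest 1 + 1 : Nat) : Int)) by push_cast; omega]
    rw [PySem.List.slice_to_natCast]
    simp [List.take_succ_cons]
  rw [hsl]
  have hfl : PySem.Int.floordiv ((1 + (pvCut rest 1 : Int)) * (1 + (pvCut rest 1 : Int) - 1)) 2
      = pvTri (pvCut rest 1 + 1) := by
    rw [show (1 + (pvCut rest 1 : Int)) = (((pvCut rest 1 + 1 : Nat) : Int)) by push_cast; omega]
    exact pvTri_floordiv (pvCut rest 1 + 1)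
  rw [hfl]
  simp only [List.sum_cons, pvTri]
  ring

-- ===== VERDICT (by name: the statements are the Claim_ definitions above) =====
theorem max_reward_spec : Claim_equal_max_reward := by
  intro reward _ hpre
  unfold Spec_max_reward
  cases hs : PySem.List.sorted reward (fun x => x) true with
  | nil => exact absurd ((PySem.List.sorted_eq_nil_iff _ _ _).mp hs) hpre
  | cons a rest => rw [pvA_eq_loopB reward a rest hs, pvB_eq_loopB reward a rest hs]
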